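-- pv_equiv track=rewrite | github.com/ahmetofficial/PD-Dyskinesia-Electrophysiology | lib/.ipynb_checkpoints/lib_event-checkpoint.py | __get_event_indices
-- ===== SOURCE A (Python) =====
-- def __get_event_indices(array):
--     """
--     Description
--         This method finds the indices of the beginning and end of the event in the array. Basically, one of the events (move or tapping) array will be provided as a parameter
--         to the function.
--
--     Input
--         :param array: A binary list represents the existence=1 and absence=0 of a particular event (move/tapping).
--
--     Output
--         :return event_indices: A list containing tupples (start_index, finish_index) of index information for events
--     """
--     event_indices     = []
--     event_started     = False
--     event_start_index = None
--
--     for i, num in enumerate(array):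
--         if num == 1:
--             if not event_started:
--                 event_start_index = i
--                 event_started = True
--         elif event_started:
--             event_indices.append((event_start_index, i - 1))
--             event_started = False
--
--     # If an event is ongoing at the end of the array
--     if event_started:
--         event_indices.append((event_start_index, len(array) - 1))
--
--     return event_indices
-- ===== SOURCE B (Python) =====
-- def __get_event_indices(array):
--     # Edge detection: pad the 1-bits with an implicit 0 on both sides, record
--     # rising edges as starts and falling edges as ends, then zip them up.
--     bits = [x == 1 for x in array]
--     edges = list(zip([False] + bits, bits + [False]))
--     starts = [i for i, (p, c) in enumerate(edges) if c and not p]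
--     ends = [i - 1 for i, (p, c) in enumerate(edges) if p and not c]
--     return list(zip(starts, ends))
-- ===== Notes on version B (the rewrite author's own statement) =====
-- stated objective: alternative
-- what changed: Replaces A's carry-over state machine (started flag + pending start index, appending on state changes) by stateless edge detection: zero-padded adjacent pairs are scanned for rising/falling edges giving start and end index lists that are zipped together.
import Mathlib
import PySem

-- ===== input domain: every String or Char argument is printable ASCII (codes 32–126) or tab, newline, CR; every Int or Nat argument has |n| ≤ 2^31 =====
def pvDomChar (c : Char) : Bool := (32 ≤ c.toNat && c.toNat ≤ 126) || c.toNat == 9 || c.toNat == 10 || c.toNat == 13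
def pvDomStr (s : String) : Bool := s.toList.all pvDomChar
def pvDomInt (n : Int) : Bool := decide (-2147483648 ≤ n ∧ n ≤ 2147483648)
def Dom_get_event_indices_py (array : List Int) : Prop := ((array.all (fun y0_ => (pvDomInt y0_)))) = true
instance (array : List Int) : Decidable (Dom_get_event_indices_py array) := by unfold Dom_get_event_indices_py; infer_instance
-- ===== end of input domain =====

-- B replaces A's carry-flag state machine by stateless edge detection on
-- zero-padded adjacent pairs (starts = rising edges, ends = falling edges, zipped);
-- objective: alternative decomposition, same O(n) cost.

-- ===== PORT A =====
-- loop body of A's for-loop: state = (event_indices, event_started, event_start_index)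
def pvAStep (st : List (Int × Int) × Bool × Option Int) (p : Int × Int) :
    List (Int × Int) × Bool × Option Int :=
  if p.2 == 1 then
    if !st.2.1 then (st.1, true, some p.1) else st
  else if st.2.1 then (st.1 ++ [(st.2.2.getD 0, p.1 - 1)], false, st.2.2)
  else st

def get_event_indices_py (array : List Int) : List (Int × Int) :=
  let s := (PySem.List.enumerate array).foldl pvAStep ([], false, none)
  if s.2.1 then s.1 ++ [(s.2.2.getD 0, (array.length : Int) - 1)] else s.1

-- ===== PORT B =====
def get_event_indices_py_alt (array : List Int) : List (Int × Int) :=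
  let bits := array.map (fun x => x == 1)
  let edges := (false :: bits).zip (bits ++ [false])
  let starts := (PySem.List.enumerate edges).filterMap
    (fun p => if p.2.2 && !p.2.1 then some p.1 else none)
  let ends := (PySem.List.enumerate edges).filterMap
    (fun p => if p.2.1 && !p.2.2 then some (p.1 - 1) else none)
  starts.zip ends

-- ===== PRECONDITION & SPEC =====
def Spec_get_event_indices_py (array : List Int) (out : List (Int × Int)) : Prop := out = get_event_indices_py_alt array
instance (array : List Int) (out : List (Int × Int)) : Decidable (Spec_get_event_indices_py array out) := by unfold Spec_get_event_indices_py; infer_instance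

-- ===== CLAIM (what is proved, stated in full; the proofs are below) =====
def Claim_equal_get_event_indices_py : Prop := ∀ (array : List Int), Dom_get_event_indices_py array → Spec_get_event_indices_py array (get_event_indices_py array)

-- ===== LEMMAS AND PROOFS =====

-- canonical recursive description of the runs, used to relate both ports
def runsSpec : List Bool → Int → Option Int → List (Int × Int)
  | [], i, os => match os with | some s => [(s, i - 1)] | none => []
  | b :: rest, i, os =>
    match os, b with
    | none, true => runsSpec rest (i + 1) (some i)
    | none, false => runsSpec rest (i + 1) none
    | some s, true => runsSpec rest (i + 1) (some s)
    | some s, false => (s, i - 1) :: runsSpec rest (i + 1) none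

def startsSpec : Bool → Int → List Bool → List Int
  | _, _, [] => []
  | p, i, b :: rest => (if b && !p then [i] else []) ++ startsSpec b (i + 1) rest

def endsSpec : Bool → Int → List Bool → List Int
  | p, i, [] => if p then [i - 1] else []
  | p, i, b :: rest => (if p && !b then [i - 1] else []) ++ endsSpec b (i + 1) rest

theorem loopA (l : List Int) (i : Int) (acc : List (Int × Int)) (started : Bool)
    (sIdx : Option Int) :
    (let r := (PySem.List.enumerate l i).foldl pvAStep (acc, started, sIdx);
     if r.2.1 then r.1 ++ [(r.2.2.getD 0, (i + l.length) - 1)] else r.1)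
    = acc ++ runsSpec (l.map (fun x => x == 1)) i
        (if started then some (sIdx.getD 0) else none) := by
  induction l generalizing i acc started sIdx with
  | nil =>
    cases started <;> simp [PySem.List.enumerate_nil, runsSpec]
  | cons x rest ih =>
    rw [PySem.List.enumerate_cons, List.foldl_cons]
    cases hx : (x == 1) with
    | true =>
      cases started with
      | false =>
        have := ih (i + 1) acc true (some i)
        simp only [if_pos, Option.getD_some] at this
        simp only [pvAStep, hx, Bool.not_false, if_pos, List.map_cons, runsSpec,
          List.length_cons, Bool.false_eq_true, if_false]
        rw [show (i + (↑(rest.length + 1) : Int) - 1) = (i + 1) + ↑rest.length - 1 by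
          push_cast; ring]
        simpa using this
      | true =>
        have := ih (i + 1) acc true sIdx
        simp only [if_pos] at this
        simp only [pvAStep, hx, Bool.not_true, if_pos, List.map_cons, runsSpec,
          List.length_cons, Bool.false_eq_true, if_false]
        rw [show (i + (↑(rest.length + 1) : Int) - 1) = (i + 1) + ↑rest.length - 1 by
          push_cast; ring]
        simpa using this
    | false =>
      cases started with
      | false =>
        have := ih (i + 1) acc false sIdx
        simp only [Bool.false_eq_true, if_false] at this
        simp only [pvAStep, hx, Bool.false_eq_true, if_false, List.map_cons, runsSpec,
          List.length_cons]
        rw [show (i + (↑(rest.length + 1) : Int) - 1) = (i + 1) + ↑rest.length - 1 by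
          push_cast; ring]
        simpa using this
      | true =>
        have := ih (i + 1) (acc ++ [(sIdx.getD 0, i - 1)]) false sIdx
        simp only [Bool.false_eq_true, if_false] at this
        simp only [pvAStep, hx, Bool.false_eq_true, if_false, if_pos, List.map_cons,
          runsSpec, List.length_cons]
        rw [show (i + (↑(rest.length + 1) : Int) - 1) = (i + 1) + ↑rest.length - 1 by
          push_cast; ring]
        simpa using this

theorem startsB (bits : List Bool) (p : Bool) (i : Int) :
    (PySem.List.enumerate ((p :: bits).zip (bits ++ [false])) i).filterMap
      (fun q => if q.2.2 && !q.2.1 then some q.1 else none)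
    = startsSpec p i bits := by
  induction bits generalizing p i with
  | nil => simp [PySem.List.enumerate_cons, PySem.List.enumerate_nil, startsSpec]
  | cons b rest ih =>
    simp only [List.cons_append, List.zip_cons_cons, PySem.List.enumerate_cons,
      List.filterMap_cons, startsSpec]
    rw [ih b (i + 1)]
    cases p <;> cases b <;> simp

theorem endsB (bits : List Bool) (p : Bool) (i : Int) :
    (PySem.List.enumerate ((p :: bits).zip (bits ++ [false])) i).filterMap
      (fun q => if q.2.1 && !q.2.2 then some (q.1 - 1) else none)
    = endsSpec p i bits := by
  induction bits generalizing p i with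
  | nil =>
    cases p <;>
      simp [PySem.List.enumerate_cons, PySem.List.enumerate_nil, endsSpec]
  | cons b rest ih =>
    simp only [List.cons_append, List.zip_cons_cons, PySem.List.enumerate_cons,
      List.filterMap_cons, endsSpec]
    rw [ih b (i + 1)]
    cases p <;> cases b <;> simp

theorem zipSpec (bits : List Bool) (i : Int) :
    ((startsSpec false i bits).zip (endsSpec false i bits) = runsSpec bits i none)
    ∧ (∀ s : Int, ((s :: startsSpec true i bits).zip (endsSpec true i bits)
        = runsSpec bits i (some s))) := by
  induction bits generalizing i with
  | nil => simp [startsSpec, endsSpec, runsSpec]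
  | cons b rest ih =>
    cases b with
    | true =>
      refine ⟨?_, fun s => ?_⟩
      · simpa [startsSpec, endsSpec, runsSpec] using (ih (i + 1)).2 i
      · simpa [startsSpec, endsSpec, runsSpec] using (ih (i + 1)).2 s
    | false =>
      refine ⟨?_, fun s => ?_⟩
      · simpa [startsSpec, endsSpec, runsSpec] using (ih (i + 1)).1
      · simpa [startsSpec, endsSpec, runsSpec] using (ih (i + 1)).1

-- ===== VERDICT (by name: the statement is the Claim_ definition above) =====
theorem get_event_indices_py_spec : Claim_equal_get_event_indices_py := by
  intro array _
  unfold Spec_get_event_indices_py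
  simp only [get_event_indices_py, get_event_indices_py_alt]
  rw [startsB, endsB, (zipSpec (List.map (fun x => x == 1) array) 0).1]
  simpa using loopA array 0 [] false none
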